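-- pv_equiv track=rewrite | github.com/saurav188/python_practice_projects | shifted_string.py | is_shifted
-- ===== SOURCE A (Python) =====
-- def is_shifted(a, b):
--     if len(a)!=len(b):
--         return False
--     pointer1=0
--     pointer2=0
--     while a[pointer1]!=b[pointer2]:
--         pointer2+=1
--     for i in range(len(a)):
--         if a[pointer1]!=b[pointer2]:
--             return False
--         pointer1+=1
--         pointer2+=1
--         if pointer1==len(a):
--             pointer1=0
--         if pointer2==len(a):
--             pointer2=0
--     return True
-- ===== SOURCE B (Python) =====
-- def is_shifted(a, b):
--     # Simpler: find the alignment of a[0] in b, then compare a against the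
--     # single corresponding rotation of b built by slicing (no modular pointer loop).
--     if len(a) != len(b):
--         return False
--     k = b.index(a[0])
--     return a == b[k:] + b[:k]
-- ===== Notes on version B (the rewrite author's own statement) =====
-- stated objective: simpler
-- what changed: Replaces the modular two-pointer comparison loop by locating a[0] in b with b.index and comparing a against the single rotation b[k:]+b[:k] built by slicing.
import Mathlib
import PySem

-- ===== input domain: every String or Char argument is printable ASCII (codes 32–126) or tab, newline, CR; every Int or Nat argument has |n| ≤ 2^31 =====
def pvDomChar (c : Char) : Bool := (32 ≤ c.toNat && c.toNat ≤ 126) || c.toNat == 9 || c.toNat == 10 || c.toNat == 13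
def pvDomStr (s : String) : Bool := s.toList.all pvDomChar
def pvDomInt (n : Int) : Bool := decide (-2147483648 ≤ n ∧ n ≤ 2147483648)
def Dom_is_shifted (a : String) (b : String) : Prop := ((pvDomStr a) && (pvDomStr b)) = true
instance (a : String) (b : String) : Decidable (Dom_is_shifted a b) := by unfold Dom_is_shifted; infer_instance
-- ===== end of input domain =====

-- B is simpler: it finds a[0] in b with b.index and compares a against the one rotation b[k:]+b[:k]
-- built by slicing, instead of A's modular two-pointer comparison loop.

-- ===== PORT A =====
-- 'while a[pointer1]!=b[pointer2]: pointer2+=1': scan the rest of b; none = the IndexError Python raises running off b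
def pvWhileA (c : Char) : List Char → Nat → Option Nat
  | [], _ => none
  | d :: rest, p2 => if c ≠ d then pvWhileA c rest (p2 + 1) else some p2

-- 'for i in range(len(a))' with the two wrapping pointers; getD is exact here: the pointers stay < length
def pvForA (al bl : List Char) : Nat → Nat → Nat → Bool
  | 0, _, _ => true
  | i + 1, p1, p2 =>
    if al.getD p1 ' ' ≠ bl.getD p2 ' ' then false
    else
      pvForA al bl i (if p1 + 1 = al.length then 0 else p1 + 1)
                     (if p2 + 1 = al.length then 0 else p2 + 1)

def is_shifted (a : String) (b : String) : Bool :=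
  let al := a.toList
  let bl := b.toList
  if al.length ≠ bl.length then false
  else
    -- a[pointer1] with pointer1 = 0; headD is exact for nonempty a (empty a raises IndexError, excluded by Pre_)
    match pvWhileA (al.headD ' ') bl 0 with
    | none => false          -- Python raises IndexError here; Pre_ excludes these inputs
    | some p2 => pvForA al bl al.length 0 p2

-- ===== PORT B =====
def is_shifted_alt (a : String) (b : String) : Bool :=
  let al := a.toList
  let bl := b.toList
  if al.length ≠ bl.length then false
  else
    match PySem.List.index? bl (al.headD ' ') with   -- k = b.index(a[0])
    | none => false          -- Python raises (ValueError, or IndexError for empty a); Pre_ excludes these inputs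
    | some k =>              -- a == b[k:] + b[:k]
      decide (al = PySem.List.slice bl (some (k : Int)) none ++ PySem.List.slice bl none (some (k : Int)))

-- ===== PRECONDITION & SPEC =====
-- Pre_ excludes exactly the inputs where BOTH Pythons raise: equal-length inputs with a empty or a[0] absent from b.
def Pre_is_shifted (a : String) (b : String) : Prop :=
  a.toList.length = b.toList.length → a.toList ≠ [] ∧ a.toList.headD ' ' ∈ b.toList
instance (a : String) (b : String) : Decidable (Pre_is_shifted a b) := by unfold Pre_is_shifted; infer_instance
def pvWitness_is_shifted : String × String := ("abc", "cab")

def Spec_is_shifted (a : String) (b : String) (out : Bool) : Prop := out = is_shifted_alt a b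
instance (a : String) (b : String) (out : Bool) : Decidable (Spec_is_shifted a b out) := by unfold Spec_is_shifted; infer_instance

-- ===== CLAIM =====
def Claim_equal_is_shifted : Prop := ∀ (a : String) (b : String), Dom_is_shifted a b → Pre_is_shifted a b → Spec_is_shifted a b (is_shifted a b)

-- ===== LEMMAS AND PROOFS =====

-- A's while-loop scan is list.index (first occurrence), offset by the starting pointer
lemma pvWhileA_eq_idxOf? (c : Char) (l : List Char) (p : Nat) :
    pvWhileA c l p = (l.idxOf? c).map (· + p) := by
  induction l generalizing p with
  | nil => simp [pvWhileA]
  | cons d rest ih =>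
    by_cases h : c = d
    · simp [pvWhileA, h, List.idxOf?_cons]
    · simp only [pvWhileA, List.idxOf?_cons, BEq.comm, beq_iff_eq, h, ↓reduceIte, ih,
        Option.map_map, ne_eq, not_false_iff]
      cases rest.idxOf? c <;> simp <;> omega

-- invariant of A's for-loop: it compares a and b cyclically from the two starting pointers
lemma pvForA_iff (al bl : List Char) (n : Nat) (ha : al.length = n) (hb : bl.length = n)
    (hn : 0 < n) :
    ∀ i p1 p2, p1 < n → p2 < n →
      (pvForA al bl i p1 p2 = true ↔
        ∀ j < i, al.getD ((p1 + j) % n) ' ' = bl.getD ((p2 + j) % n) ' ') := by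
  intro i
  induction i with
  | zero => intro p1 p2 _ _; simp [pvForA]
  | succ i ih =>
    intro p1 p2 h1 h2
    have e1 : (if p1 + 1 = al.length then 0 else p1 + 1) = (p1 + 1) % n := by
      rw [ha]; split_ifs with h
      · rw [h, Nat.mod_self]
      · rw [Nat.mod_eq_of_lt (by omega)]
    have e2 : (if p2 + 1 = al.length then 0 else p2 + 1) = (p2 + 1) % n := by
      rw [ha]; split_ifs with h
      · rw [h, Nat.mod_self]
      · rw [Nat.mod_eq_of_lt (by omega)]
    rw [pvForA, e1, e2]
    have hm1 : (p1 + 1) % n < n := Nat.mod_lt _ hn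
    have hm2 : (p2 + 1) % n < n := Nat.mod_lt _ hn
    have r1 : ∀ p j : Nat, ((p + 1) % n + j) % n = (p + (j + 1)) % n := by
      intro p j
      rw [Nat.mod_add_mod]; congr 1; omega
    by_cases hc : al.getD p1 ' ' = bl.getD p2 ' '
    · rw [if_neg (not_not_intro hc), ih _ _ hm1 hm2]
      constructor
      · intro h j hj
        rcases Nat.eq_zero_or_pos j with rfl | hj0
        · simpa [Nat.mod_eq_of_lt h1, Nat.mod_eq_of_lt h2] using hc
        · have hh := h (j - 1) (by omega)
          rw [r1, r1] at hh
          simpa [show j - 1 + 1 = j by omega] using hh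
      · intro h j hj
        rw [r1, r1]
        exact h (j + 1) (by omega)
    · rw [if_pos hc]
      simp only [Bool.false_eq_true, false_iff]
      intro h
      exact hc (by simpa [Nat.mod_eq_of_lt h1, Nat.mod_eq_of_lt h2] using h 0 (by omega))

-- ===== VERDICT =====
theorem is_shifted_spec : Claim_equal_is_shifted := by
  intro a b _ hpre
  unfold Spec_is_shifted
  simp only [is_shifted, is_shifted_alt]
  by_cases hl : a.toList.length = b.toList.length
  · rw [if_neg (not_not_intro hl), if_neg (not_not_intro hl)]
    obtain ⟨hne, hmem⟩ := hpre hl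
    obtain ⟨k, hk⟩ : ∃ k, PySem.List.index? b.toList (a.toList.headD ' ') = some k :=
      Option.isSome_iff_exists.mp ((PySem.List.index?_isSome_iff b.toList (a.toList.headD ' ')).mpr hmem)
    obtain ⟨hklt, hbk, -⟩ := PySem.List.getElem_of_index?_eq_some hk
    have hk' : List.idxOf? (a.toList.headD ' ') b.toList = some k := by
      rw [← PySem.List.index?_eq_idxOf?]; exact hk
    rw [pvWhileA_eq_idxOf?, hk', hk]
    simp only [Option.map_some, Nat.add_zero]
    have hn : 0 < a.toList.length := List.length_pos_iff.mpr hne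
    have hbn : b.toList.length = a.toList.length := hl.symm
    have hkn : k < a.toList.length := by omega
    rw [PySem.List.slice_from_natCast, PySem.List.slice_to_natCast]
    have hrot : b.toList.drop k ++ b.toList.take k = b.toList.rotate k :=
      (List.rotate_eq_drop_append_take (by omega)).symm
    rw [Bool.eq_iff_iff, decide_eq_true_iff,
      pvForA_iff a.toList b.toList a.toList.length rfl hbn hn a.toList.length 0 k hn hkn, hrot]
    have hlenrot : (b.toList.rotate k).length = a.toList.length := by
      rw [List.length_rotate, hbn]
    constructor
    · intro h
      apply List.ext_getElem (by rw [hlenrot])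
      intro j hj1 hj2
      have hjn : j < a.toList.length := hj1
      have hget := h j hjn
      rw [Nat.zero_add, Nat.mod_eq_of_lt hjn] at hget
      have hmodlt : (k + j) % a.toList.length < b.toList.length := by
        rw [hbn]; exact Nat.mod_lt _ hn
      rw [List.getD_eq_getElem a.toList ' ' hj1,
        List.getD_eq_getElem b.toList ' ' hmodlt] at hget
      rw [List.getElem_rotate, hget]
      congr 1
      rw [hbn]
      congr 1
      omega
    · intro h j hjn
      rw [Nat.zero_add, Nat.mod_eq_of_lt hjn]
      have hj1 : j < a.toList.length := hjn
      have hj2 : j < (b.toList.rotate k).length := by omega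
      have hrotget := List.getElem_of_eq h hj1
      rw [List.getElem_rotate] at hrotget
      have hmodlt : (k + j) % a.toList.length < b.toList.length := by
        rw [hbn]; exact Nat.mod_lt _ hn
      rw [List.getD_eq_getElem a.toList ' ' hj1, hrotget,
        List.getD_eq_getElem b.toList ' ' hmodlt]
      congr 1
      rw [hbn]
      congr 1
      omega
  · rw [if_pos hl, if_pos hl]
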